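-- pv_equiv track=rewrite | github.com/hectoraristy/CC-multi-tool-chat-application | backend/src/services/chunking.py | _compute_line_chunks
-- ===== SOURCE A (Python) =====
-- def _compute_line_chunks(content: str, chunk_size_chars: int) -> list[tuple[int, int]]:
--     """Return ``(start, end)`` character offsets for each chunk.
--
--     Boundaries are snapped to newlines when possible, then to spaces as a
--     fallback.  If a segment contains neither (e.g. base64 or minified JSON),
--     it is split at exactly *chunk_size_chars* characters.
--     """
--     if not content:
--         return [(0, 0)]
--
--     chunks: list[tuple[int, int]] = []
--     start = 0
--     length = len(content)
--
--     while start < length: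
--         end = min(start + chunk_size_chars, length)
--         if end < length:
--             newline_pos = content.rfind("\n", start, end)
--             if newline_pos > start:
--                 end = newline_pos + 1
--             else:
--                 space_pos = content.rfind(" ", start, end)
--                 if space_pos > start:
--                     end = space_pos + 1
--         chunks.append((start, end))
--         start = end
--
--     return chunks or [(0, length)]
-- ===== SOURCE B (Python) =====
-- def _positions(content, ch):
--     """Sorted list of all indices of ch in content."""
--     return [i for i, c in enumerate(content) if c == ch]
--
--
-- def _last_below(idxs, bound):
--     """Largest value in sorted idxs strictly below bound, else -1 (binary search)."""
--     lo, hi = 0, len(idxs)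
--     while lo < hi:
--         mid = (lo + hi) // 2
--         if idxs[mid] < bound:
--             lo = mid + 1
--         else:
--             hi = mid
--     return idxs[lo - 1] if lo else -1
--
--
-- def _compute_line_chunks(content: str, chunk_size_chars: int) -> list[tuple[int, int]]:
--     if not content:
--         return [(0, 0)]
--
--     length = len(content)
--     newlines = _positions(content, "\n")
--     spaces = _positions(content, " ")
--
--     def cut(start):
--         end = min(start + chunk_size_chars, length)
--         if end == length:
--             return end
--         p = _last_below(newlines, end)
--         if p > start:
--             return p + 1
--         q = _last_below(spaces, end)
--         if q > start:
--             return q + 1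
--         return end
--
--     ends = []
--     start = 0
--     while start < length:
--         end = cut(start)
--         ends.append(end)
--         start = end
--     return list(zip([0] + ends[:-1], ends))
-- ===== Notes on version B (the rewrite author's own statement) =====
-- stated objective: alternative
-- what changed: B scans the content once to build sorted occurrence-index lists for '\n' and ' ', finds each chunk's snap point by binary search (largest index below the window end) instead of A's per-chunk backward rfind scan, and assembles the result by collecting the cut endpoints and zipping them with their shifted copy instead of appending (start,end) pairs inside the loop.
import Mathlib
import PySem

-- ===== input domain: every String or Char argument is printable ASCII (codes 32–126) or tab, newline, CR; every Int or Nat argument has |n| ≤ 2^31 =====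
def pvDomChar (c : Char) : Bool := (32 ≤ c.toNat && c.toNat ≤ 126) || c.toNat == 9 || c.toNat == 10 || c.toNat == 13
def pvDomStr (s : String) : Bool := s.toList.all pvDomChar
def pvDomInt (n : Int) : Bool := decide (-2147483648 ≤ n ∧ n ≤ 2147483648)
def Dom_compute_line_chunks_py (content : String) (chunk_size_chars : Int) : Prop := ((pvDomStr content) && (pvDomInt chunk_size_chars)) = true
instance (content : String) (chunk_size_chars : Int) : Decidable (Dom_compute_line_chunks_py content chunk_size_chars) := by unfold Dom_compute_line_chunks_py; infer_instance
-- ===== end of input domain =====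

-- B builds sorted occurrence-index lists for '\n' and ' ' in one pass, binary-searches each
-- chunk's snap point instead of A's backward rfind scan, and zips the collected endpoints into
-- pairs instead of appending pairs in the loop (objective: alternative).

-- ===== PORT A =====

-- content.rfind(c, s, e) over the window [s, j]: scan j, j-1, …, s for the last index holding c, else -1.
def pvRfind (c : Char) (cs : List Char) (s : Nat) : Nat → Int
  | 0 => if cs[0]? = some c then 0 else -1
  | j+1 => if cs[j+1]? = some c then ((j+1 : Nat) : Int)
           else if j+1 ≤ s then -1 else pvRfind c cs s j

-- the body computing `end` for one iteration of A's while loop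
def aEnd (cs : List Char) (n csize start : Int) : Int :=
  let e0 := min (start + csize) n
  if e0 < n then
    -- Python rfind returns -1 on an empty window; the `start < e0` guard only makes that total
    let np := if start < e0 then pvRfind '\n' cs start.toNat (e0.toNat - 1) else -1
    if np > start then np + 1
    else
      let sp := if start < e0 then pvRfind ' ' cs start.toNat (e0.toNat - 1) else -1
      if sp > start then sp + 1 else e0
  else e0

-- A's while loop, appending (start, end) pairs; fuel = length+1 suffices (start strictly increases)
def aLoop (cs : List Char) (n csize : Int) : Nat → Int → List (Int × Int)
  | 0, _ => []
  | fuel+1, start =>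
    if start < n then
      let e := aEnd cs n csize start
      (start, e) :: aLoop cs n csize fuel e
    else []

def compute_line_chunks_py (content : String) (chunk_size_chars : Int) : List (Int × Int) :=
  let cs := content.toList
  if cs = [] then [(0, 0)]
  else
    let n : Int := cs.length
    let chunks := aLoop cs n chunk_size_chars (cs.length + 1) 0
    if chunks = [] then [(0, n)] else chunks

-- ===== PORT B =====

-- _positions: the comprehension [i for i, c in enumerate(content) if c == ch], ported as an
-- index-carrying recursion (exact)
def positions (c : Char) : List Char → Nat → List Int
  | [], _ => []
  | ch :: rest, i =>
    if ch = c then (i : Int) :: positions c rest (i+1) else positions c rest (i+1)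

-- _last_below's binary-search while loop (lo, hi)
def lastBelowAux (xs : List Int) (bound : Int) (lo hi : Nat) : Nat :=
  if _h : lo < hi then
    let mid := (lo + hi) / 2
    if xs.getD mid 0 < bound then lastBelowAux xs bound (mid+1) hi
    else lastBelowAux xs bound lo mid
  else lo
termination_by hi - lo
decreasing_by all_goals omega

-- _last_below: largest value of the sorted xs strictly below bound, else -1
def lastBelow (xs : List Int) (bound : Int) : Int :=
  let lo := lastBelowAux xs bound 0 xs.length
  if lo = 0 then -1 else xs.getD (lo - 1) (-1)

-- the inner function cut(start)
def cutB (nl sp : List Int) (n csize start : Int) : Int :=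
  let e := min (start + csize) n
  if e = n then e
  else
    let p := lastBelow nl e
    if p > start then p + 1
    else
      let q := lastBelow sp e
      if q > start then q + 1 else e

-- B's while loop collecting only the cut endpoints
def bEnds (nl sp : List Int) (n csize : Int) : Nat → Int → List Int
  | 0, _ => []
  | fuel+1, start =>
    if start < n then
      let e := cutB nl sp n csize start
      e :: bEnds nl sp n csize fuel e
    else []

def compute_line_chunks_py_alt (content : String) (chunk_size_chars : Int) : List (Int × Int) :=
  let cs := content.toList
  if cs = [] then [(0, 0)]
  else
    let n : Int := cs.length
    let nl := positions '\n' cs 0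
    let sp := positions ' ' cs 0
    let es := bEnds nl sp n chunk_size_chars (cs.length + 1) 0
    List.zip (0 :: es.dropLast) es

-- ===== PRECONDITION & SPEC =====
-- Pre_ excludes nonempty content with chunk_size_chars ≤ 0, on which A's while loop never
-- advances `start` and A diverges (returns nothing).
def Pre_compute_line_chunks_py (content : String) (chunk_size_chars : Int) : Prop :=
  content = "" ∨ 1 ≤ chunk_size_chars
instance (content : String) (chunk_size_chars : Int) : Decidable (Pre_compute_line_chunks_py content chunk_size_chars) := by unfold Pre_compute_line_chunks_py; infer_instance

def pvWitness_compute_line_chunks_py : String × Int := ("hello world\nok", 6)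

def Spec_compute_line_chunks_py (content : String) (chunk_size_chars : Int) (out : List (Int × Int)) : Prop := out = compute_line_chunks_py_alt content chunk_size_chars
instance (content : String) (chunk_size_chars : Int) (out : List (Int × Int)) : Decidable (Spec_compute_line_chunks_py content chunk_size_chars out) := by unfold Spec_compute_line_chunks_py; infer_instance

-- ===== CLAIM (what is proved, stated in full; the proofs are below) =====
def Claim_equal_compute_line_chunks_py : Prop := ∀ (content : String) (chunk_size_chars : Int), Dom_compute_line_chunks_py content chunk_size_chars → Pre_compute_line_chunks_py content chunk_size_chars → Spec_compute_line_chunks_py content chunk_size_chars (compute_line_chunks_py content chunk_size_chars)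

-- ===== LEMMAS AND PROOFS =====

-- spec function for the A side: last index ≤ j holding c, else -1
def lastOcc (c : Char) (cs : List Char) : Nat → Int
  | 0 => if cs[0]? = some c then 0 else -1
  | j+1 => if cs[j+1]? = some c then ((j+1 : Nat) : Int) else lastOcc c cs j

theorem lastOcc_le (c : Char) (cs : List Char) (j : Nat) : lastOcc c cs j ≤ (j : Int) := by
  induction j with
  | zero => simp [lastOcc]; split <;> omega
  | succ j ih => simp only [lastOcc]; split <;> omega

theorem pvRfind_eq (c : Char) (cs : List Char) (s j : Nat) (h : s ≤ j) :
    pvRfind c cs s j = if (s : Int) ≤ lastOcc c cs j then lastOcc c cs j else -1 := by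
  induction j with
  | zero =>
    interval_cases s
    simp only [pvRfind, lastOcc]; split <;> simp
  | succ j ih =>
    simp only [pvRfind, lastOcc]
    split
    · split
      · rfl
      · omega
    · by_cases hs : j + 1 ≤ s
      · have hsj : s = j + 1 := by omega
        have := lastOcc_le c cs j
        simp only [hs, if_pos]
        split
        · omega
        · rfl
      · simp only [hs, if_neg, not_false_iff]
        exact ih (by omega)

-- characterization of lastOcc: either no occurrence up to j, or the greatest one
theorem lastOcc_char (c : Char) (cs : List Char) (j : Nat) :
    (lastOcc c cs j = -1 ∧ ∀ i : Nat, i ≤ j → cs[i]? ≠ some c) ∨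
    (∃ m : Nat, lastOcc c cs j = (m : Int) ∧ m ≤ j ∧ cs[m]? = some c ∧
      ∀ i : Nat, m < i → i ≤ j → cs[i]? ≠ some c) := by
  induction j with
  | zero =>
    by_cases h : cs[0]? = some c
    · right; exact ⟨0, by simp [lastOcc, h], le_refl 0, h, by omega⟩
    · left
      refine ⟨by simp [lastOcc, h], ?_⟩
      intro i hi; interval_cases i; exact h
  | succ j ih =>
    by_cases h : cs[j+1]? = some c
    · right
      refine ⟨j+1, by simp [lastOcc, h], le_refl _, h, by omega⟩
    · rcases ih with ⟨hv, hno⟩ | ⟨m, hv, hm, hc, hmax⟩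
      · left
        refine ⟨by simp [lastOcc, h, hv], ?_⟩
        intro i hi
        rcases Nat.lt_or_ge i (j+1) with hl | hg
        · exact hno i (by omega)
        · have : i = j+1 := by omega
          rw [this]; exact h
      · right
        refine ⟨m, by simp [lastOcc, h, hv], by omega, hc, ?_⟩
        intro i h1 h2
        rcases Nat.lt_or_ge i (j+1) with hl | hg
        · exact hmax i h1 (by omega)
        · have : i = j+1 := by omega
          rw [this]; exact h

-- membership in positions
theorem pos_mem (c : Char) (cs : List Char) (i : Nat) (x : Int) :
    x ∈ positions c cs i ↔ ∃ j : Nat, x = ((i + j : Nat) : Int) ∧ cs[j]? = some c := by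
  induction cs generalizing i with
  | nil => simp [positions]
  | cons ch rest ih =>
    by_cases h : ch = c
    · simp only [positions, if_pos h, List.mem_cons, ih (i+1)]
      constructor
      · rintro (rfl | ⟨j, rfl, hj⟩)
        · exact ⟨0, by simp, by simp [h]⟩
        · exact ⟨j+1, by push_cast; ring_nf, by simpa using hj⟩
      · rintro ⟨j, rfl, hj⟩
        cases j with
        | zero => left; simp
        | succ j =>
          right; exact ⟨j, by push_cast; ring_nf, by simpa using hj⟩
    · simp only [positions, if_neg h, ih (i+1)]
      constructor
      · rintro ⟨j, rfl, hj⟩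
        exact ⟨j+1, by push_cast; ring_nf, by simpa using hj⟩
      · rintro ⟨j, rfl, hj⟩
        cases j with
        | zero => simp at hj; exact absurd hj h
        | succ j => exact ⟨j, by push_cast; ring_nf, by simpa using hj⟩

theorem pos_lb (c : Char) (cs : List Char) (i : Nat) (x : Int) (hx : x ∈ positions c cs i) :
    (i : Int) ≤ x := by
  rcases (pos_mem c cs i x).mp hx with ⟨j, rfl, _⟩
  push_cast; omega

theorem pos_pairwise (c : Char) (cs : List Char) (i : Nat) :
    (positions c cs i).Pairwise (· < ·) := by
  induction cs generalizing i with
  | nil => simp [positions]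
  | cons ch rest ih =>
    by_cases h : ch = c
    · simp only [positions, if_pos h]
      refine List.pairwise_cons.mpr ⟨?_, ih (i+1)⟩
      intro x hx
      have := pos_lb c rest (i+1) x hx
      push_cast at this ⊢; omega
    · simp only [positions, if_neg h]; exact ih (i+1)

-- on a ≤-sorted list, the element at index i is < b iff i is below the count of elements < b
theorem getD_lt_iff (xs : List Int) (hs : xs.Pairwise (· ≤ ·)) (b : Int) (i : Nat)
    (hi : i < xs.length) :
    xs.getD i 0 < b ↔ i < (xs.filter (fun x => decide (x < b))).length := by
  induction xs generalizing i with
  | nil => simp at hi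
  | cons x t ih =>
    rcases List.pairwise_cons.mp hs with ⟨hhead, htail⟩
    cases i with
    | zero =>
      by_cases hx : x < b
      · simp [List.getD, hx]
      · have hft : t.filter (fun x => decide (x < b)) = [] := by
          rw [List.filter_eq_nil_iff]
          intro y hy
          have := hhead y hy
          simp; omega
        simp [List.getD, hx, hft]
    | succ i =>
      have hi' : i < t.length := by simpa using hi
      by_cases hx : x < b
      · simp only [List.getD_cons_succ, List.filter_cons, hx, decide_true, if_pos,
          List.length_cons]
        rw [ih htail i hi']
        omega
      · have hft : t.filter (fun x => decide (x < b)) = [] := by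
          rw [List.filter_eq_nil_iff]
          intro y hy
          have := hhead y hy
          simp; omega
        have hnb : ¬ t.getD i 0 < b := by
          rw [ih htail i hi', hft]
          simp
        rw [List.getD_eq_getElem?_getD] at hnb
        simp only [List.getD_cons_succ, List.filter_cons, hx]
        simp [hft]
        omega

-- the binary search returns the count of elements < bound
theorem lastBelowAux_eq (xs : List Int) (hs : xs.Pairwise (· ≤ ·)) (b : Int) :
    ∀ d lo hi, hi - lo = d → lo ≤ (xs.filter (fun x => decide (x < b))).length →
      (xs.filter (fun x => decide (x < b))).length ≤ hi → hi ≤ xs.length →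
      lastBelowAux xs b lo hi = (xs.filter (fun x => decide (x < b))).length := by
  intro d
  induction d using Nat.strong_induction_on with
  | _ d ihd =>
    intro lo hi hd hlo hhi hlen
    unfold lastBelowAux
    by_cases h : lo < hi
    · rw [dif_pos h]
      have hmid1 : lo ≤ (lo + hi) / 2 := by omega
      have hmid2 : (lo + hi) / 2 < hi := by omega
      have hmlt : (lo + hi) / 2 < xs.length := by omega
      by_cases hc : xs.getD ((lo + hi) / 2) 0 < b
      · rw [if_pos hc]
        have hk := (getD_lt_iff xs hs b _ hmlt).mp hc
        exact ihd (hi - ((lo + hi) / 2 + 1)) (by omega) _ _ rfl (by omega) hhi hlen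
      · rw [if_neg hc]
        have hk : ¬ (lo + hi) / 2 < (xs.filter (fun x => decide (x < b))).length :=
          fun hh => hc ((getD_lt_iff xs hs b _ hmlt).mpr hh)
        exact ihd ((lo + hi) / 2 - lo) (by omega) _ _ rfl hlo (by omega) (by omega)
    · rw [dif_neg h]
      omega

theorem lastBelow_eq_getD (xs : List Int) (hs : xs.Pairwise (· ≤ ·)) (b : Int) :
    lastBelow xs b =
      if (xs.filter (fun x => decide (x < b))).length = 0 then -1
      else xs.getD ((xs.filter (fun x => decide (x < b))).length - 1) (-1) := by
  unfold lastBelow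
  rw [lastBelowAux_eq xs hs b xs.length 0 xs.length rfl (by omega)
    (List.length_filter_le _ _) (le_refl _)]

-- the key lemma: binary search over the position list = A's lastOcc
theorem lastBelow_eq (c : Char) (cs : List Char) (b : Int) (hb1 : 1 ≤ b)
    (hb2 : b ≤ (cs.length : Int)) :
    lastBelow (positions c cs 0) b = lastOcc c cs (b.toNat - 1) := by
  have hs : (positions c cs 0).Pairwise (· ≤ ·) :=
    (pos_pairwise c cs 0).imp (fun h => le_of_lt h)
  set xs := positions c cs 0 with hxs
  set f := xs.filter (fun x => decide (x < b)) with hf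
  rw [lastBelow_eq_getD xs hs b, ← hf]
  have hmemf : ∀ x : Int, x ∈ f ↔ x ∈ xs ∧ x < b := by
    intro x; rw [hf, List.mem_filter]; simp
  have hj : (b.toNat - 1 : Nat) + 1 = b.toNat := by omega
  by_cases hk : f.length = 0
  · rw [if_pos hk]
    have hnone : ∀ i : Nat, i ≤ b.toNat - 1 → cs[i]? ≠ some c := by
      intro i hi hc
      have hxmem : ((i : Nat) : Int) ∈ xs := by
        rw [hxs, pos_mem]; exact ⟨i, by simp, hc⟩
      have hlt : ((i : Nat) : Int) < b := by push_cast; omega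
      have : ((i : Nat) : Int) ∈ f := (hmemf _).mpr ⟨hxmem, hlt⟩
      rw [List.length_eq_zero_iff] at hk
      rw [hk] at this; simp at this
    rcases lastOcc_char c cs (b.toNat - 1) with ⟨hv, _⟩ | ⟨m, hv, hm, hc, _⟩
    · rw [hv]
    · exact absurd hc (hnone m hm)
  · rw [if_neg hk]
    have hklen : f.length ≤ xs.length := by rw [hf]; exact List.length_filter_le _ _
    have hklt : f.length - 1 < xs.length := by omega
    set r := xs.getD (f.length - 1) (-1) with hr
    have hrget : r = xs[f.length - 1]'hklt := by
      rw [hr, List.getD_eq_getElem?_getD, List.getElem?_eq_getElem hklt]; rfl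
    have hrlt : r < b := by
      have hiff := getD_lt_iff xs hs b (f.length - 1) hklt
      rw [← hf] at hiff
      have h0 : xs.getD (f.length - 1) 0 < b := hiff.mpr (by omega)
      have : xs.getD (f.length - 1) 0 = xs[f.length - 1]'hklt := by
        rw [List.getD_eq_getElem?_getD, List.getElem?_eq_getElem hklt]; rfl
      rw [hrget]; rw [this] at h0; exact h0
    have hrmem : r ∈ xs := by rw [hrget]; exact List.getElem_mem _
    rcases (pos_mem c cs 0 r).mp (by rw [← hxs]; exact hrmem) with ⟨j0, hj0, hcj0⟩
    simp only [Nat.zero_add] at hj0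
    -- maximality of r among occurrences < b
    have hmax : ∀ i : Nat, r < (i : Int) → (i : Int) < b → cs[i]? ≠ some c := by
      intro i hri hib hci
      have hxmem : ((i : Nat) : Int) ∈ xs := by
        rw [hxs, pos_mem]; exact ⟨i, by simp, hci⟩
      rcases List.mem_iff_getElem.mp hxmem with ⟨t, ht, hxt⟩
      have htf : (t : Nat) < f.length := by
        have h0 : xs.getD t 0 = xs[t]'ht := by
          rw [List.getD_eq_getElem?_getD, List.getElem?_eq_getElem ht]; rfl
        have hlt0 : xs.getD t 0 < b := by rw [h0, hxt]; exact hib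
        have hiff2 := getD_lt_iff xs hs b t ht
        rw [← hf] at hiff2
        exact hiff2.mp hlt0
      have hle : xs[t]'ht ≤ xs[f.length - 1]'hklt := by
        rcases Nat.lt_or_ge t (f.length - 1) with hl | hg
        · exact (List.pairwise_iff_getElem.mp hs) t (f.length - 1) ht hklt hl
        · have : t = f.length - 1 := by omega
          subst this; exact le_refl _
      rw [hxt, ← hrget] at hle
      omega
    rcases lastOcc_char c cs (b.toNat - 1) with ⟨hv, hno⟩ | ⟨m, hv, hm, hc, hmx⟩
    · exfalso
      exact hno j0 (by omega) hcj0
    · rw [hv]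
      -- show m = j0 (= r)
      rcases Nat.lt_or_ge m j0 with hl | hg
      · exfalso; exact hmx j0 hl (by omega) hcj0
      · rcases Nat.lt_or_ge j0 m with hl2 | hg2
        · exfalso
          exact hmax m (by omega) (by push_cast; omega) hc
        · have : m = j0 := by omega
          omega

-- the two per-iteration boundary computations agree
theorem end_eq (cs : List Char) (csize start : Int) (h0 : 0 ≤ start)
    (_hn : start < (cs.length : Int)) (hcs : 1 ≤ csize) :
    aEnd cs (cs.length : Int) csize start
      = cutB (positions '\n' cs 0) (positions ' ' cs 0) (cs.length : Int) csize start := by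
  unfold aEnd cutB
  set n : Int := (cs.length : Int) with hdefn
  set e0 : Int := min (start + csize) n with hdefe
  by_cases he : e0 < n
  · have hene : ¬ e0 = n := by omega
    have he0 : start < e0 := by omega
    have he1 : 1 ≤ e0 := by omega
    have hsle : start.toNat ≤ e0.toNat - 1 := by omega
    have key : ∀ c : Char,
        (if start < e0 then pvRfind c cs start.toNat (e0.toNat - 1) else -1) > start
          ↔ lastBelow (positions c cs 0) e0 > start := by
      intro c
      rw [if_pos he0, pvRfind_eq c cs _ _ hsle,
        lastBelow_eq c cs e0 he1 (by omega)]
      split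
      · exact Iff.rfl
      · constructor <;> intro h <;> omega
    have keyv : ∀ c : Char,
        (if start < e0 then pvRfind c cs start.toNat (e0.toNat - 1) else -1) > start →
        (if start < e0 then pvRfind c cs start.toNat (e0.toNat - 1) else -1)
          = lastBelow (positions c cs 0) e0 := by
      intro c h
      rw [if_pos he0] at h ⊢
      rw [pvRfind_eq c cs _ _ hsle] at h ⊢
      rw [lastBelow_eq c cs e0 he1 (by omega)]
      split at h
      · rw [if_pos (by assumption)]
      · omega
    rw [if_pos he, if_neg hene]
    by_cases hnp : (if start < e0 then pvRfind '\n' cs start.toNat (e0.toNat - 1) else -1) > start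
    · rw [if_pos hnp, if_pos ((key '\n').mp hnp), keyv '\n' hnp]
    · rw [if_neg hnp, if_neg (fun h => hnp ((key '\n').mpr h))]
      by_cases hsp : (if start < e0 then pvRfind ' ' cs start.toNat (e0.toNat - 1) else -1) > start
      · rw [if_pos hsp, if_pos ((key ' ').mp hsp), keyv ' ' hsp]
      · rw [if_neg hsp, if_neg (fun h => hsp ((key ' ').mpr h))]
  · have hene : e0 = n := by omega
    rw [if_neg he, if_pos hene]

theorem end_gt (cs : List Char) (csize start : Int) (h0 : 0 ≤ start)
    (_hn : start < (cs.length : Int)) (hcs : 1 ≤ csize) :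
    start < aEnd cs (cs.length : Int) csize start := by
  simp only [aEnd]
  split_ifs <;> omega

-- zip bookkeeping: prepending a start to the shifted-endpoint zip
theorem zip_shift (s e : Int) (es : List Int) :
    (s, e) :: List.zip (e :: es.dropLast) es = List.zip (s :: (e :: es).dropLast) (e :: es) := by
  cases es with
  | nil => rfl
  | cons x t => rfl

-- A's pair-appending loop = B's endpoint loop zipped with its shifted copy
theorem loop_zip (cs : List Char) (csize : Int) (hcs : 1 ≤ csize) (fuel : Nat) :
    ∀ start : Int, 0 ≤ start →
      aLoop cs (cs.length : Int) csize fuel start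
        = List.zip (start :: (bEnds (positions '\n' cs 0) (positions ' ' cs 0)
              (cs.length : Int) csize fuel start).dropLast)
            (bEnds (positions '\n' cs 0) (positions ' ' cs 0) (cs.length : Int) csize fuel start) := by
  induction fuel with
  | zero => intro start _; rfl
  | succ fuel ih =>
    intro start h0
    simp only [aLoop, bEnds]
    by_cases hlt : start < (cs.length : Int)
    · rw [if_pos hlt, if_pos hlt]
      rw [← end_eq cs csize start h0 hlt hcs]
      have hgt := end_gt cs csize start h0 hlt hcs
      rw [ih (aEnd cs (cs.length : Int) csize start) (by omega)]
      exact zip_shift start _ _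
    · rw [if_neg hlt, if_neg hlt]; rfl

-- ===== VERDICT (by name: the statement is the Claim_ definition above) =====
theorem compute_line_chunks_py_spec : Claim_equal_compute_line_chunks_py := by
  intro content csize _ hpre
  unfold Spec_compute_line_chunks_py compute_line_chunks_py compute_line_chunks_py_alt
  by_cases hnil : content.toList = []
  · simp [hnil]
  · have hcs : 1 ≤ csize := by
      rcases hpre with h | h
      · exact absurd (by rw [h]; rfl) hnil
      · exact h
    have hn : 1 ≤ (content.toList.length : Int) := by
      have := List.length_pos_iff.mpr hnil
      omega
    simp only [hnil, if_false]
    rw [loop_zip content.toList csize hcs (content.toList.length + 1) 0 (by omega)]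
    have hne : List.zip (0 :: (bEnds (positions '\n' content.toList 0)
        (positions ' ' content.toList 0) (content.toList.length : Int) csize
        (content.toList.length + 1) 0).dropLast)
        (bEnds (positions '\n' content.toList 0) (positions ' ' content.toList 0)
          (content.toList.length : Int) csize (content.toList.length + 1) 0) ≠ [] := by
      simp only [bEnds, if_pos (show (0:Int) < (content.toList.length : Int) by omega)]
      exact fun h => by rw [← zip_shift 0 _ _] at h; simp at h
    rw [if_neg hne]
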